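-- pv_equiv track=rewrite | github.com/KeigoMatsumura/atCoder-practice | ABC/050/Answers/C-LiningUp.py | check
-- ===== SOURCE A (Python) =====
-- def check(A):
--     length = len(A)
--     if length %2 == 0:
--         for i in range(length//2):
--             if A[2*i] == A[2*i+1] == 2*i+2:
--                 continue
--             else:
--                 return False
--         return True
--     else:
--         for i in range(length//2+1):
--             if i == 0:
--                 if A[0]==0:
--                     continue
--                 else:
--                     return False
--             else:
--                 if A[2*i-1]==A[2*i]==2*i:
--                     continue
--                 else:
--                     return False
--         return True
-- ===== SOURCE B (Python) =====
-- def check(A):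
--     n = len(A)
--     if n % 2 == 0:
--         expected = [2 * (i // 2) + 2 for i in range(n)]
--     else:
--         expected = [2 * ((i + 1) // 2) for i in range(n)]
--     return A == expected
-- ===== Notes on version B (the rewrite author's own statement) =====
-- stated objective: simpler
-- what changed: B builds the expected target list [2,2,4,4,...] (with a leading 0 for odd length) from len(A) and returns one whole-list equality, replacing A's two parity-specific index-checking loops with early returns.
import Mathlib
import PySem

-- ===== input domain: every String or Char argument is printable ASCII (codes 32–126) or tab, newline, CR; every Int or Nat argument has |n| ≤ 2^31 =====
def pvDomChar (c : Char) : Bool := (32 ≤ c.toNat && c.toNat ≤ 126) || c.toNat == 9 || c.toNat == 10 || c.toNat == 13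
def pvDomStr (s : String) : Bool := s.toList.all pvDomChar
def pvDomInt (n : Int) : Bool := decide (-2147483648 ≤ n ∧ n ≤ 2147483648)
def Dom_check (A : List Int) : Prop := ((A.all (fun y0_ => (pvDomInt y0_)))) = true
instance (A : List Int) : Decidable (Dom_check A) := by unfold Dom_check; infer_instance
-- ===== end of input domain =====

-- B replaces A's two parity-specific index-checking loops by building the expected
-- target list from len(A) and returning one whole-list equality (objective: simpler).

-- ===== PORT A =====
-- A's for-loops return False as soon as one check fails and True at the end:
-- ported as short-circuiting `all` over the same ranges, with the same chained
-- comparisons on PySem.List.pyGet? indexing.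
def check (A : List Int) : Bool :=
  let length := A.length
  if length % 2 == 0 then
    (List.range (length / 2)).all (fun i =>
      PySem.List.pyGet? A ((2 * i : Nat) : Int) == PySem.List.pyGet? A ((2 * i + 1 : Nat) : Int)
        && PySem.List.pyGet? A ((2 * i + 1 : Nat) : Int) == some ((2 * i + 2 : Nat) : Int))
  else
    (List.range (length / 2 + 1)).all (fun i =>
      if i == 0 then
        PySem.List.pyGet? A 0 == some (0 : Int)
      else
        PySem.List.pyGet? A ((2 * i - 1 : Nat) : Int) == PySem.List.pyGet? A ((2 * i : Nat) : Int)
          && PySem.List.pyGet? A ((2 * i : Nat) : Int) == some ((2 * i : Nat) : Int))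

-- ===== PORT B =====
def check_alt (A : List Int) : Bool :=
  let n := A.length
  let expected : List Int :=
    if n % 2 == 0 then
      (List.range n).map (fun i => ((2 * (i / 2) + 2 : Nat) : Int))
    else
      (List.range n).map (fun i => ((2 * ((i + 1) / 2) : Nat) : Int))
  A == expected

-- ===== PRECONDITION & SPEC =====
def Spec_check (A : List Int) (out : Bool) : Prop := out = check_alt A
instance (A : List Int) (out : Bool) : Decidable (Spec_check A out) := by unfold Spec_check; infer_instance

-- ===== CLAIM (what is proved, stated in full; the proofs are below) =====
def Claim_equal_check : Prop := ∀ (A : List Int), Dom_check A → Spec_check A (check A)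

-- ===== LEMMAS AND PROOFS =====

theorem pv_pyGet_zero (A : List Int) : PySem.List.pyGet? A 0 = A[0]? := by
  simpa using PySem.List.pyGet?_natCast (xs := A) (n := 0)

-- A list equals the map of f over the range of its own length iff it is pointwise some (f i).
theorem pv_eq_map_range_iff (A : List Int) (f : Nat → Int) :
    (A = (List.range A.length).map f) ↔ ∀ i, i < A.length → A[i]? = some (f i) := by
  constructor
  · intro h i hi
    have h2 : A[i]? = ((List.range A.length).map f)[i]? := by conv_lhs => rw [h]
    rw [h2, List.getElem?_map]
    simp [hi]
  · intro h
    apply List.ext_getElem?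
    intro i
    by_cases hi : i < A.length
    · rw [h i hi, List.getElem?_map]
      simp [hi]
    · have h1 : A[i]? = none := List.getElem?_eq_none (by omega)
      have h2 : ((List.range A.length).map f)[i]? = none :=
        List.getElem?_eq_none (by simpa using by omega)
      rw [h1, h2]

theorem pv_check_eq (A : List Int) : check A = check_alt A := by
  by_cases hp : A.length % 2 = 0
  · -- even length
    rw [Bool.eq_iff_iff]
    simp only [check, check_alt, hp, beq_self_eq_true, if_pos,
      List.all_eq_true, List.mem_range, Bool.and_eq_true, beq_iff_eq,
      PySem.List.pyGet?_natCast, pv_eq_map_range_iff]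
    constructor
    · intro hA i hi
      by_cases he : i % 2 = 0
      · obtain ⟨j, rfl⟩ : ∃ j, i = 2 * j := ⟨i / 2, by omega⟩
        have hj := hA j (by omega)
        have e : 2 * j / 2 = j := by omega
        rw [e, hj.1, hj.2]
      · obtain ⟨j, rfl⟩ : ∃ j, i = 2 * j + 1 := ⟨i / 2, by omega⟩
        have hj := hA j (by omega)
        have e : (2 * j + 1) / 2 = j := by omega
        rw [e, hj.2]
    · intro hA j hj
      have h1 := hA (2 * j) (by omega)
      have h2 := hA (2 * j + 1) (by omega)
      have e1 : 2 * j / 2 = j := by omega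
      have e2 : (2 * j + 1) / 2 = j := by omega
      rw [e1] at h1; rw [e2] at h2
      exact ⟨by rw [h1, h2], h2⟩
  · -- odd length
    rw [Bool.eq_iff_iff]
    simp only [check, check_alt, hp, beq_iff_eq, if_false,
      List.all_eq_true, List.mem_range,
      PySem.List.pyGet?_natCast, pv_eq_map_range_iff]
    constructor
    · intro hA i hi
      by_cases h0 : i = 0
      · have h := hA 0 (by omega)
        rw [if_pos rfl, beq_iff_eq, pv_pyGet_zero] at h
        subst h0
        simpa using h
      · have hj := hA ((i + 1) / 2) (by omega)
        rw [if_neg (by omega)] at hj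
        simp only [Bool.and_eq_true, beq_iff_eq] at hj
        by_cases he : i % 2 = 1
        · obtain ⟨j, rfl⟩ : ∃ j, i = 2 * j + 1 := ⟨i / 2, by omega⟩
          have e : (2 * j + 1 + 1) / 2 = j + 1 := by omega
          rw [e] at hj
          have e2 : 2 * (j + 1) - 1 = 2 * j + 1 := by omega
          rw [e2] at hj
          rw [e, hj.1, hj.2]
        · obtain ⟨j, rfl⟩ : ∃ j, i = 2 * j := ⟨i / 2, by omega⟩
          have hj0 : 0 < j := by omega
          have e : (2 * j + 1) / 2 = j := by omega
          rw [e] at hj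
          rw [e, hj.2]
    · intro hA i hi
      by_cases h0 : i = 0
      · subst h0
        rw [if_pos rfl, beq_iff_eq, pv_pyGet_zero]
        have h := hA 0 (by omega)
        simpa using h
      · rw [if_neg h0]
        simp only [Bool.and_eq_true, beq_iff_eq]
        have h1 := hA (2 * i - 1) (by omega)
        have h2 := hA (2 * i) (by omega)
        have e1 : (2 * i - 1 + 1) / 2 = i := by omega
        have e2 : (2 * i + 1) / 2 = i := by omega
        rw [e1] at h1; rw [e2] at h2
        exact ⟨by rw [h1, h2], h2⟩

-- ===== VERDICT =====
theorem check_spec : Claim_equal_check := by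
  intro A _
  unfold Spec_check
  exact pv_check_eq A
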